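-- pv_equiv track=rewrite | github.com/atulanandnitt/questionsBank | basicMathematicalProblem/pendrive_computer.py | findSol2
-- ===== SOURCE A (Python) =====
-- def findSol2(n,m):
--     counter =0
--     copiedIntoComputers =0
--     for i in range(1,m):
--         if copiedIntoComputers <n:
--             copiedIntoComputers += i
--             counter +=1
--
--     while copiedIntoComputers <n:
--         copiedIntoComputers += m
--         counter +=1
--
--     return counter
-- ===== SOURCE B (Python) =====
-- def findSol2(n, m):
--     # Closed-form / binary-search reformulation: counter is the least k with
--     # k*(k+1)//2 >= n if that k fits below m, else (m-1) plus ceiling division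
--     # for the remaining amount copied m at a time.
--     if n <= 0:
--         return 0
--     t = (m - 1) * m // 2          # total copied by the incremental phase run fully
--     if m >= 2 and t >= n:
--         lo, hi = 1, m - 1         # least k in [1, m-1] with k*(k+1)//2 >= n
--         while lo < hi:
--             mid = (lo + hi) // 2
--             if mid * (mid + 1) // 2 >= n:
--                 hi = mid
--             else:
--                 lo = mid + 1
--         return lo
--     return (m - 1) + (n - t + m - 1) // m
-- ===== Notes on version B (the rewrite author's own statement) =====
-- stated objective: faster
-- what changed: Replaced the step-by-step simulation (for-loop over range(1,m) plus a while-loop adding m) by arithmetic: a binary search for the least k with k(k+1)/2 >= n in the incremental phase, and a single ceiling division for the bulk-copy phase.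
import Mathlib
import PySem

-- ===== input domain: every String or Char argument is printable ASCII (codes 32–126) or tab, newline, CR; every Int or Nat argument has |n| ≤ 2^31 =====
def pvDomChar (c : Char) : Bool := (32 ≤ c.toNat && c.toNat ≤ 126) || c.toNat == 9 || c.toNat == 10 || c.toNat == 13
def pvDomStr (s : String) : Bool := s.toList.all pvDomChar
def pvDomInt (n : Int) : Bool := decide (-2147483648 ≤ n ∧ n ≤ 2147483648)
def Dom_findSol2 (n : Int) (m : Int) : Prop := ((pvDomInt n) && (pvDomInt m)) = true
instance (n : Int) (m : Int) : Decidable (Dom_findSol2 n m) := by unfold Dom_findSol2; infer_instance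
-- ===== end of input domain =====

-- B replaces A's step-by-step simulation by a binary search for the triangular
-- threshold plus one ceiling division (asymptotically faster).

-- ===== PORT A =====
-- A's while-loop; the extra '1 ≤ m' in the guard only makes the recursion total
-- (in Python the loop diverges when copied < n and m ≤ 0; Pre_ excludes that).
def findSol2While (n : Int) (m : Int) (counter : Int) (copied : Int) : Int :=
  if _h : copied < n ∧ 1 ≤ m then findSol2While n m (counter + 1) (copied + m) else counter
termination_by (n - copied).toNat
decreasing_by omega

def findSol2 (n : Int) (m : Int) : Int :=
  let s := (PySem.List.pyRange 1 m 1).foldl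
    (fun (st : Int × Int) i => if st.2 < n then (st.1 + 1, st.2 + i) else st) (0, 0)
  findSol2While n m s.1 s.2

-- ===== PORT B =====
-- B's while-loop: binary search for the least k in [lo, hi] with k*(k+1)//2 >= n.
def findSol2Bsearch (n : Int) (lo : Int) (hi : Int) : Int :=
  if h : lo < hi then
    let mid := PySem.Int.floordiv (lo + hi) 2
    if n ≤ PySem.Int.floordiv (mid * (mid + 1)) 2 then findSol2Bsearch n lo mid
    else findSol2Bsearch n (mid + 1) hi
  else lo
termination_by (hi - lo).toNat
decreasing_by
  · have hd : PySem.Int.floordiv (lo + hi) 2 < hi := by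
      rw [PySem.Int.floordiv_lt_iff_lt_mul (by omega)]; omega
    omega
  · have hd := (PySem.Int.floordiv_two_mid_bounds (le_of_lt h)).1
    omega

def findSol2_alt (n : Int) (m : Int) : Int :=
  if n ≤ 0 then 0
  else
    let t := PySem.Int.floordiv ((m - 1) * m) 2
    if 2 ≤ m ∧ n ≤ t then findSol2Bsearch n 1 (m - 1)
    else (m - 1) + PySem.Int.floordiv (n - t + m - 1) m

-- ===== PRECONDITION & SPEC =====
-- Pre_ excludes exactly the inputs with n > 0 and m ≤ 0, on which A's while-loop
-- never terminates (Python diverges); A returns on all other inputs.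
def Pre_findSol2 (n : Int) (m : Int) : Prop := 0 < n → 1 ≤ m
instance (n : Int) (m : Int) : Decidable (Pre_findSol2 n m) := by unfold Pre_findSol2; infer_instance

def pvWitness_findSol2 : Int × Int := (5, 2)

def Spec_findSol2 (n : Int) (m : Int) (out : Int) : Prop := out = findSol2_alt n m
instance (n : Int) (m : Int) (out : Int) : Decidable (Spec_findSol2 n m out) := by unfold Spec_findSol2; infer_instance

-- ===== CLAIM (what is proved, stated in full; the proofs are below) =====
def Claim_equal_findSol2 : Prop := ∀ (n : Int) (m : Int), Dom_findSol2 n m → Pre_findSol2 n m → Spec_findSol2 n m (findSol2 n m)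

-- ===== LEMMAS AND PROOFS =====

-- T k = k(k+1)/2 (exact: k(k+1) is even; Lean's ediv = floor for positive divisor)
def pvT (k : Int) : Int := k * (k + 1) / 2

lemma pvT_succ (k : Int) : pvT (k + 1) = pvT k + (k + 1) := by
  unfold pvT
  have : (k + 1) * (k + 1 + 1) = k * (k + 1) + (k + 1) * 2 := by ring
  rw [this, Int.add_mul_ediv_right _ _ (by norm_num)]

lemma pvT_mono {a b : Int} (ha : 0 ≤ a) (hab : a ≤ b) : pvT a ≤ pvT b := by
  unfold pvT
  apply Int.ediv_le_ediv (by norm_num)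
  nlinarith

lemma pvT_zero : pvT 0 = 0 := by decide

lemma pvT_neg_one : pvT (-1) = 0 := by decide

-- uniqueness of the triangular threshold
lemma pvT_uniq {n a b : Int} (ha : 1 ≤ a) (hb : 1 ≤ b)
    (ha1 : pvT (a - 1) < n) (ha2 : n ≤ pvT a)
    (hb1 : pvT (b - 1) < n) (hb2 : n ≤ pvT b) : a = b := by
  by_contra hne
  rcases lt_or_gt_of_ne hne with h | h
  · have : pvT a ≤ pvT (b - 1) := pvT_mono (by omega) (by omega)
    omega
  · have : pvT b ≤ pvT (a - 1) := pvT_mono (by omega) (by omega)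
    omega

-- A's while-loop in closed form
lemma findSol2While_eq (n m : Int) (hm : 1 ≤ m) : ∀ (c p : Int),
    findSol2While n m c p = c + if p < n then (n - p + m - 1) / m else 0 := by
  intro c p
  induction c, p using findSol2While.induct n m with
  | case1 c p h ih =>
      rw [findSol2While, dif_pos h, ih, if_pos h.1]
      by_cases h2 : p + m < n
      · rw [if_pos h2]
        have he : n - p + m - 1 = (n - (p + m) + m - 1) + 1 * m := by ring
        rw [he, Int.add_mul_ediv_right _ _ (by omega)]
        ring
      · rw [if_neg h2]
        have hfd : PySem.Int.floordiv (n - p + m - 1) m = 1 :=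
          (PySem.Int.floordiv_eq_iff_of_pos (by omega)).mpr ⟨by omega, by omega⟩
        rw [PySem.Int.floordiv_eq_ediv_of_pos (by omega)] at hfd
        omega
  | case2 c p h =>
      rw [findSol2While, dif_neg h]
      rcases not_and_or.mp h with h1 | h2
      · rw [if_neg h1]; ring
      · omega

-- A's for-loop invariant: after folding range(1, 1+j) the state is (k, T k)
-- with 0 ≤ k ≤ j, T (k-1) < n, and (k < j → n ≤ T k).
lemma findSol2_fold_inv (n : Int) (hn : 0 < n) : ∀ (j : Nat),
    ∃ k : Int,
      (PySem.List.pyRange 1 (1 + (j : Int)) 1).foldl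
        (fun (st : Int × Int) i => if st.2 < n then (st.1 + 1, st.2 + i) else st) (0, 0)
        = (k, pvT k)
      ∧ 0 ≤ k ∧ k ≤ j ∧ pvT (k - 1) < n ∧ (k < j → n ≤ pvT k) := by
  intro j
  induction j with
  | zero =>
      refine ⟨0, ?_, by omega, by omega, by rw [show (0:Int) - 1 = -1 by ring, pvT_neg_one]; omega, by omega⟩
      rw [PySem.List.pyRange_one_eq_nil (by omega)]
      simp [pvT_zero]
  | succ j ih =>
      obtain ⟨k, hfold, hk0, hkj, hk1, hk2⟩ := ih
      have hsplit : PySem.List.pyRange 1 (1 + ((j : Int) + 1)) 1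
          = PySem.List.pyRange 1 (1 + (j : Int)) 1 ++ [1 + (j : Int)] := by
        have := PySem.List.pyRange_one_succ_right (a := 1) (b := 1 + (j : Int)) (by omega)
        rw [show (1 : Int) + ((j : Int) + 1) = (1 + (j : Int)) + 1 by ring, this]
      by_cases hTk : pvT k < n
      · have hkeq : k = j := by
          by_contra hne
          have : k < (j : Int) := by omega
          exact absurd (hk2 this) (by omega)
        refine ⟨k + 1, ?_, by omega, by push_cast; omega, by simpa using hTk, fun _ => ?_⟩
        · rw [show ((j : Nat) + 1 : Nat) = (j + 1 : Nat) from rfl]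
          push_cast
          rw [show (1 : Int) + ((j : Int) + 1) = 1 + ((j : Int) + 1) by ring]
          rw [show ((1 : Int) + ((j:Int)+1)) = (1 + (j:Int)) + 1 by ring]
          rw [PySem.List.pyRange_one_succ_right (a := 1) (b := 1 + (j : Int)) (by omega)]
          rw [List.foldl_append, hfold]
          simp only [List.foldl_cons, List.foldl_nil]
          rw [if_pos hTk]
          rw [pvT_succ k, hkeq]
          norm_num
          ring
        · -- k + 1 < j + 1 is impossible since k = j
          omega
      · refine ⟨k, ?_, hk0, by push_cast; omega, hk1, fun _ => by omega⟩
        push_cast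
        rw [show (1 : Int) + ((j:Int)+1) = (1 + (j:Int)) + 1 by ring]
        rw [PySem.List.pyRange_one_succ_right (a := 1) (b := 1 + (j : Int)) (by omega)]
        rw [List.foldl_append, hfold]
        simp only [List.foldl_cons, List.foldl_nil]
        rw [if_neg hTk]

-- the fold is the identity when n ≤ 0
lemma findSol2_fold_nonpos (n : Int) (hn : n ≤ 0) (l : List Int) :
    l.foldl (fun (st : Int × Int) i => if st.2 < n then (st.1 + 1, st.2 + i) else st) (0, 0)
      = (0, 0) := by
  induction l with
  | nil => rfl
  | cons x xs ih => simp only [List.foldl_cons, if_neg (by omega : ¬ (0 : Int) < n)]; exact ih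

-- B's binary search finds the (unique) threshold
lemma findSol2Bsearch_spec (n : Int) : ∀ (lo hi : Int), 1 ≤ lo → lo ≤ hi →
    pvT (lo - 1) < n → n ≤ pvT hi →
    ∃ r : Int, findSol2Bsearch n lo hi = r ∧ lo ≤ r ∧ r ≤ hi ∧ pvT (r - 1) < n ∧ n ≤ pvT r := by
  intro lo hi
  induction lo, hi using findSol2Bsearch.induct n with
  | case1 lo hi h mid hcmp ih =>
      intro h1 h2 h3 h4
      have hmlo : lo ≤ mid := (PySem.Int.floordiv_two_mid_bounds (le_of_lt h)).1
      have hmhi : mid < hi := by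
        show PySem.Int.floordiv (lo + hi) 2 < hi
        rw [PySem.Int.floordiv_lt_iff_lt_mul (by omega)]; omega
      have hmidT : PySem.Int.floordiv (mid * (mid + 1)) 2 = pvT mid := by
        rw [PySem.Int.floordiv_eq_ediv_of_pos (by omega)]; rfl
      rw [findSol2Bsearch, dif_pos h, if_pos hcmp]
      rw [hmidT] at hcmp
      obtain ⟨r, hr, hr1, hr2, hr3, hr4⟩ := ih h1 hmlo h3 hcmp
      exact ⟨r, hr, hr1, by omega, hr3, hr4⟩
  | case2 lo hi h mid hcmp ih =>
      intro h1 h2 h3 h4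
      have hmlo : lo ≤ mid := (PySem.Int.floordiv_two_mid_bounds (le_of_lt h)).1
      have hmhi : mid < hi := by
        show PySem.Int.floordiv (lo + hi) 2 < hi
        rw [PySem.Int.floordiv_lt_iff_lt_mul (by omega)]; omega
      have hmidT : PySem.Int.floordiv (mid * (mid + 1)) 2 = pvT mid := by
        rw [PySem.Int.floordiv_eq_ediv_of_pos (by omega)]; rfl
      rw [findSol2Bsearch, dif_pos h, if_neg hcmp]
      rw [hmidT] at hcmp
      have hlt : pvT (mid + 1 - 1) < n := by
        rw [show mid + 1 - 1 = mid by ring]; omega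
      obtain ⟨r, hr, hr1, hr2, hr3, hr4⟩ := ih (by omega) (by omega) hlt h4
      exact ⟨r, hr, by omega, hr2, hr3, hr4⟩
  | case3 lo hi h =>
      intro h1 h2 h3 h4
      have heq : lo = hi := by omega
      rw [findSol2Bsearch, dif_neg h]
      exact ⟨lo, rfl, le_refl _, h2, h3, heq ▸ h4⟩

-- ===== VERDICT (by name: the statement is the Claim_ definition above) =====
theorem findSol2_spec : Claim_equal_findSol2 := by
  intro n m _ hpre
  unfold Spec_findSol2 findSol2 findSol2_alt
  by_cases hn : n ≤ 0
  · rw [if_pos hn]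
    simp only [findSol2_fold_nonpos n hn]
    rw [findSol2While, dif_neg (by omega)]
  · have hn' : 0 < n := by omega
    have hm : 1 ≤ m := hpre hn'
    have hj : m = 1 + ((m - 1).toNat : Int) := by omega
    obtain ⟨k, hfold, hk0, hkj, hk1, hk2⟩ := findSol2_fold_inv n hn' (m - 1).toNat
    have hkm : k ≤ m - 1 := by omega
    have hk2' : k < m - 1 → n ≤ pvT k := fun h => hk2 (by omega)
    have hfold' : (PySem.List.pyRange 1 m 1).foldl
        (fun (st : Int × Int) i => if st.2 < n then (st.1 + 1, st.2 + i) else st) (0, 0)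
        = (k, pvT k) := by rw [hj]; exact hfold
    rw [if_neg (by omega)]
    simp only [hfold']
    have ht : PySem.Int.floordiv ((m - 1) * m) 2 = pvT (m - 1) := by
      rw [PySem.Int.floordiv_eq_ediv_of_pos (by omega)]
      unfold pvT; congr 1; ring
    simp only [ht]
    by_cases hTk : pvT k < n
    · -- incremental phase exhausted: k = m - 1, T(m-1) < n, bulk copies remain
      have hkeq : k = m - 1 := by
        rcases lt_or_eq_of_le hkm with h | h
        · exact absurd (hk2' h) (by omega)
        · exact h
      rw [findSol2While_eq n m hm, if_pos hTk]
      rw [if_neg (by rw [← hkeq]; omega)]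
      rw [← hkeq, PySem.Int.floordiv_eq_ediv_of_pos (by omega)]
    · -- threshold reached inside the incremental phase
      have hTk' : n ≤ pvT k := by omega
      have hkpos : 1 ≤ k := by
        rcases lt_or_eq_of_le hk0 with h | h
        · omega
        · exfalso; rw [← h, pvT_zero] at hTk'; omega
      have hm2 : 2 ≤ m := by omega
      have htge : n ≤ pvT (m - 1) := le_trans hTk' (pvT_mono (by omega) hkm)
      rw [findSol2While_eq n m hm, if_neg (by omega)]
      rw [if_pos ⟨hm2, htge⟩]
      obtain ⟨r, hr, hr1, hr2, hr3, hr4⟩ :=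
        findSol2Bsearch_spec n 1 (m - 1) (le_refl 1)
          (by omega) (by rw [show (1:Int) - 1 = 0 by ring, pvT_zero]; omega) htge
      rw [hr]
      have : k = r := pvT_uniq hkpos (by omega) hk1 hTk' hr3 hr4
      omega
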